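-- pv_equiv track=rewrite | github.com/georgiusk/Weinachten-und-Zombie-Elfen | WeinachtenUndZombieElfen.py | giftExchange
-- ===== SOURCE A (Python) =====
-- def giftExchange(square):
--     H=0
--     HH=0
--     Z=0
--     ZH=0
--     for i in square:
--         if i[0]=="H":H+=1
--         elif i[0]=="HH":HH+=1
--         elif i[0]=="Z":Z+=1
--         elif i[0] =="ZH":ZH+=1
--     if ZH>=1 and (HH>=1 or H>=1):
--         for i in square:
--             if i[0]=="H":
--                 i[0]="HH"
--     H=0
--     HH=0
--     Z=0
--     ZH=0
--     for i in square:
--         if i[0]=="H":H+=1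
--         elif i[0]=="HH":HH+=1
--         elif i[0]=="Z":Z+=1
--         elif i[0]=="ZH":ZH+=1
--     if (Z>=1 or ZH>=1) and (H>=1 or HH>=1):
--         if Z>=(2*HH):
--             for i in square:
--                 if i[0]=="H" or i[0]=="HH":
--                     i[0]="Z"
--         elif Z<(2*HH):
--             for i in square:
--                 if i[0]=="Z":
--                     i[0]="ZH"
--     return square
-- ===== SOURCE B (Python) =====
-- def giftExchange(square):
--     h = hh = z = zh = 0
--     for row in square:
--         x = row[0]
--         if x == "H": h += 1
--         elif x == "HH": hh += 1
--         elif x == "Z": z += 1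
--         elif x == "ZH": zh += 1
--     cond1 = zh >= 1 and (hh >= 1 or h >= 1)
--     hh1 = hh + h if cond1 else hh
--     h1 = 0 if cond1 else h
--     cond2 = (z >= 1 or zh >= 1) and (h1 >= 1 or hh1 >= 1)
--     branch1 = cond2 and z >= 2 * hh1
--     branch2 = cond2 and z < 2 * hh1
--     final = {
--         "H": "Z" if branch1 else ("HH" if cond1 else "H"),
--         "HH": "Z" if branch1 else "HH",
--         "Z": "ZH" if branch2 else "Z",
--     }
--     for row in square:
--         row[0] = final.get(row[0], row[0])
--     return square
-- ===== Notes on version B (the rewrite author's own statement) =====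
-- stated objective: simpler
-- what changed: B counts the four labels in a single pass, computes the two relabel conditions arithmetically from those counts, composes the two relabel steps into one label-to-label mapping and applies it in one rewrite pass, instead of A's recount-and-rescan structure of up to four passes.
import Mathlib
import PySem

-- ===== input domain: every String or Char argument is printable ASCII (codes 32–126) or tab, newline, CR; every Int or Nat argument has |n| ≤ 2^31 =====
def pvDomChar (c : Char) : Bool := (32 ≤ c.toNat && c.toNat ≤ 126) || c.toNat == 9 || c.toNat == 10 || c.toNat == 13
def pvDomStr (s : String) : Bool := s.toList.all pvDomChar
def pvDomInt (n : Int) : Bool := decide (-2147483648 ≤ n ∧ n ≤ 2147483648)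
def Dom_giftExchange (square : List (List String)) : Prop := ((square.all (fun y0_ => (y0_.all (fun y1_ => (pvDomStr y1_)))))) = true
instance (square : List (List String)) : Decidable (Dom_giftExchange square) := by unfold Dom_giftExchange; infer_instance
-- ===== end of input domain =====

-- B composes A's two in-place relabel passes into one label-to-label mapping applied in a single
-- rewrite pass after one counting pass (objective: simpler); both Pythons mutate `square` in place,
-- so the equivalence proved here is about the return value (the mutation is the same).

-- ===== PORT A =====
-- the counting loop (A runs it twice, B once; shared helper since both Pythons contain the identical
-- loop); a row is read via headI, which yields "" for an empty row — Pre_ excludes empty rows,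
-- where the Python raises IndexError on i[0]
def pvStep (s : Int × Int × Int × Int) (r : List String) : Int × Int × Int × Int :=
  if r.headI == "H" then (s.1 + 1, s.2.1, s.2.2.1, s.2.2.2)
  else if r.headI == "HH" then (s.1, s.2.1 + 1, s.2.2.1, s.2.2.2)
  else if r.headI == "Z" then (s.1, s.2.1, s.2.2.1 + 1, s.2.2.2)
  else if r.headI == "ZH" then (s.1, s.2.1, s.2.2.1, s.2.2.2 + 1)
  else s

def pvCount (l : List (List String)) : Int × Int × Int × Int := l.foldl pvStep (0, 0, 0, 0)

-- A's three in-place relabel loops, as one row-rewrite each (i[0] = … keeps the rest of the row)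
def pvRelabelH (r : List String) : List String :=
  if r.headI == "H" then "HH" :: r.tail else r

def pvRelabelHtoZ (r : List String) : List String :=
  if r.headI == "H" || r.headI == "HH" then "Z" :: r.tail else r

def pvRelabelZ (r : List String) : List String :=
  if r.headI == "Z" then "ZH" :: r.tail else r

def giftExchange (square : List (List String)) : List (List String) :=
  let c := pvCount square
  let sq1 := if c.2.2.2 ≥ 1 ∧ (c.2.1 ≥ 1 ∨ c.1 ≥ 1) then square.map pvRelabelH else square
  let d := pvCount sq1
  if (d.2.2.1 ≥ 1 ∨ d.2.2.2 ≥ 1) ∧ (d.1 ≥ 1 ∨ d.2.1 ≥ 1) then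
    if d.2.2.1 ≥ 2 * d.2.1 then sq1.map pvRelabelHtoZ
    else if d.2.2.1 < 2 * d.2.1 then sq1.map pvRelabelZ
    else sq1
  else sq1

-- ===== PORT B =====
-- Source B's `final` dict with identity default, as a function on labels
def pvFinal (cond1 branch1 branch2 : Bool) (x : String) : String :=
  if x == "H" then (if branch1 then "Z" else if cond1 then "HH" else x)
  else if x == "HH" then (if branch1 then "Z" else x)
  else if x == "Z" then (if branch2 then "ZH" else x)
  else x

def giftExchange_alt (square : List (List String)) : List (List String) :=
  let c := pvCount square
  let cond1 : Bool := decide (c.2.2.2 ≥ 1 ∧ (c.2.1 ≥ 1 ∨ c.1 ≥ 1))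
  let hh1 : Int := if cond1 then c.2.1 + c.1 else c.2.1
  let h1 : Int := if cond1 then 0 else c.1
  let cond2 : Bool := decide ((c.2.2.1 ≥ 1 ∨ c.2.2.2 ≥ 1) ∧ (h1 ≥ 1 ∨ hh1 ≥ 1))
  let branch1 : Bool := cond2 && decide (c.2.2.1 ≥ 2 * hh1)
  let branch2 : Bool := cond2 && decide (c.2.2.1 < 2 * hh1)
  square.map (fun r => match r with
    | [] => []
    | x :: t => pvFinal cond1 branch1 branch2 x :: t)

-- ===== PRECONDITION & SPEC =====
-- Pre_ excludes squares containing an empty row: there Python A (and B alike) raises IndexError on i[0].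
def Pre_giftExchange (square : List (List String)) : Prop := ∀ r ∈ square, r ≠ []
instance (square : List (List String)) : Decidable (Pre_giftExchange square) := by
  unfold Pre_giftExchange; infer_instance

def pvWitness_giftExchange : List (List String) := [["H"], ["ZH"], ["Z", "x"]]

def Spec_giftExchange (square : List (List String)) (out : List (List String)) : Prop := out = giftExchange_alt square
instance (square : List (List String)) (out : List (List String)) : Decidable (Spec_giftExchange square out) := by unfold Spec_giftExchange; infer_instance

-- ===== CLAIM (what is proved, stated in full; the proofs are below) =====
def Claim_equal_giftExchange : Prop := ∀ (square : List (List String)), Dom_giftExchange square → Pre_giftExchange square → Spec_giftExchange square (giftExchange square)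

-- ===== LEMMAS AND PROOFS =====

def pvAdd4 (a b : Int × Int × Int × Int) : Int × Int × Int × Int :=
  (a.1 + b.1, a.2.1 + b.2.1, a.2.2.1 + b.2.2.1, a.2.2.2 + b.2.2.2)

theorem pvStep_add (a : Int × Int × Int × Int) (r : List String) :
    pvStep a r = pvAdd4 a (pvStep (0, 0, 0, 0) r) := by
  obtain ⟨a1, a2, a3, a4⟩ := a
  unfold pvStep pvAdd4
  split_ifs <;> simp

theorem pvAdd4_assoc (a b c : Int × Int × Int × Int) :
    pvAdd4 (pvAdd4 a b) c = pvAdd4 a (pvAdd4 b c) := by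
  unfold pvAdd4; simp; omega

theorem pvAdd4_zero (a : Int × Int × Int × Int) : pvAdd4 a (0, 0, 0, 0) = a := by
  unfold pvAdd4; simp

theorem pvFoldl_add (l : List (List String)) (a : Int × Int × Int × Int) :
    l.foldl pvStep a = pvAdd4 a (pvCount l) := by
  induction l generalizing a with
  | nil => simp [pvCount, pvAdd4_zero]
  | cons r t ih =>
      have hcount : pvCount (r :: t) = pvAdd4 (pvStep (0, 0, 0, 0) r) (pvCount t) := by
        simp only [pvCount, List.foldl_cons]; rw [ih]; rfl
      rw [List.foldl_cons, ih, hcount, pvStep_add a r, pvAdd4_assoc]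

theorem pvCount_cons (r : List String) (t : List (List String)) :
    pvCount (r :: t) = pvAdd4 (pvStep (0, 0, 0, 0) r) (pvCount t) := by
  simp only [pvCount, List.foldl_cons]
  rw [pvFoldl_add]; rfl

-- after A's first relabel pass: the H-count becomes 0, the HH-count absorbs it, Z/ZH unchanged
theorem pvCount_map_relabelH (l : List (List String)) :
    pvCount (l.map pvRelabelH) =
      (0, (pvCount l).2.1 + (pvCount l).1, (pvCount l).2.2.1, (pvCount l).2.2.2) := by
  induction l with
  | nil => simp [pvCount]
  | cons r t ih =>
      rw [List.map_cons, pvCount_cons, pvCount_cons, ih]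
      by_cases h1 : r.headI = "H"
      · have : pvRelabelH r = "HH" :: r.tail := by simp [pvRelabelH, h1]
        rw [this]
        simp [pvStep, h1, pvAdd4]
        omega
      · have hrel : pvRelabelH r = r := by simp [pvRelabelH, h1]
        rw [hrel]
        unfold pvStep
        split_ifs <;> simp_all [pvAdd4] <;> try omega

-- row-level identities: B's composed mapping vs A's relabel passes, one per flag combination
theorem pvRow_id (r : List String) :
    (match r with | [] => ([] : List String) | x :: t => pvFinal false false false x :: t) = r := by
  cases r with
  | nil => rfl
  | cons x t => simp only [pvFinal]; split_ifs <;> simp_all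

theorem pvRow_c1 (r : List String) :
    (match r with | [] => ([] : List String) | x :: t => pvFinal true false false x :: t) = pvRelabelH r := by
  cases r with
  | nil => simp [pvRelabelH]
  | cons x t => simp only [pvFinal, pvRelabelH, List.headI_cons, List.tail_cons]; split_ifs <;> simp_all

theorem pvRow_b1_c1 (r : List String) :
    (match r with | [] => ([] : List String) | x :: t => pvFinal true true false x :: t) =
      pvRelabelHtoZ (pvRelabelH r) := by
  cases r with
  | nil => simp [pvRelabelH, pvRelabelHtoZ]
  | cons x t => simp only [pvFinal, pvRelabelH, pvRelabelHtoZ, List.headI_cons, List.tail_cons]; split_ifs <;> simp_all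

theorem pvRow_b1 (r : List String) :
    (match r with | [] => ([] : List String) | x :: t => pvFinal false true false x :: t) =
      pvRelabelHtoZ r := by
  cases r with
  | nil => simp [pvRelabelHtoZ]
  | cons x t => simp only [pvFinal, pvRelabelHtoZ, List.headI_cons, List.tail_cons]; split_ifs <;> simp_all

theorem pvRow_b2_c1 (r : List String) :
    (match r with | [] => ([] : List String) | x :: t => pvFinal true false true x :: t) =
      pvRelabelZ (pvRelabelH r) := by
  cases r with
  | nil => simp [pvRelabelH, pvRelabelZ]
  | cons x t => simp only [pvFinal, pvRelabelH, pvRelabelZ, List.headI_cons, List.tail_cons]; split_ifs <;> simp_all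

theorem pvRow_b2 (r : List String) :
    (match r with | [] => ([] : List String) | x :: t => pvFinal false false true x :: t) =
      pvRelabelZ r := by
  cases r with
  | nil => simp [pvRelabelZ]
  | cons x t => simp only [pvFinal, pvRelabelZ, List.headI_cons, List.tail_cons]; split_ifs <;> simp_all

theorem pvMain (square : List (List String)) : giftExchange square = giftExchange_alt square := by
  simp only [giftExchange, giftExchange_alt]
  by_cases c1 : (pvCount square).2.2.2 ≥ 1 ∧ ((pvCount square).2.1 ≥ 1 ∨ (pvCount square).1 ≥ 1)
  case pos =>
    rw [if_pos c1, decide_eq_true c1, pvCount_map_relabelH]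
    simp only [if_true]
    by_cases c2 : ((pvCount square).2.2.1 ≥ 1 ∨ (pvCount square).2.2.2 ≥ 1) ∧
        ((0:Int) ≥ 1 ∨ (pvCount square).2.1 + (pvCount square).1 ≥ 1)
    case pos =>
      rw [if_pos c2, decide_eq_true c2, Bool.true_and, Bool.true_and]
      by_cases cz : (pvCount square).2.2.1 ≥ 2 * ((pvCount square).2.1 + (pvCount square).1)
      case pos =>
        have hlt : ¬ (pvCount square).2.2.1 < 2 * ((pvCount square).2.1 + (pvCount square).1) := by omega
        rw [if_pos cz, decide_eq_true cz, decide_eq_false hlt, List.map_map]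
        exact List.map_congr_left (fun r _ => (pvRow_b1_c1 r).symm)
      case neg =>
        have hlt : (pvCount square).2.2.1 < 2 * ((pvCount square).2.1 + (pvCount square).1) := by omega
        rw [if_neg cz, if_pos hlt, decide_eq_false cz, decide_eq_true hlt, List.map_map]
        exact List.map_congr_left (fun r _ => (pvRow_b2_c1 r).symm)
    case neg =>
      rw [if_neg c2, decide_eq_false c2, Bool.false_and, Bool.false_and]
      exact List.map_congr_left (fun r _ => (pvRow_c1 r).symm)
  case neg =>
    rw [if_neg c1, decide_eq_false c1]
    simp only [Bool.false_eq_true, if_false]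
    by_cases c2 : ((pvCount square).2.2.1 ≥ 1 ∨ (pvCount square).2.2.2 ≥ 1) ∧
        ((pvCount square).1 ≥ 1 ∨ (pvCount square).2.1 ≥ 1)
    case pos =>
      rw [if_pos c2, decide_eq_true c2, Bool.true_and, Bool.true_and]
      by_cases cz : (pvCount square).2.2.1 ≥ 2 * (pvCount square).2.1
      case pos =>
        have hlt : ¬ (pvCount square).2.2.1 < 2 * (pvCount square).2.1 := by omega
        rw [if_pos cz, decide_eq_true cz, decide_eq_false hlt]
        exact List.map_congr_left (fun r _ => (pvRow_b1 r).symm)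
      case neg =>
        have hlt : (pvCount square).2.2.1 < 2 * (pvCount square).2.1 := by omega
        rw [if_neg cz, if_pos hlt, decide_eq_false cz, decide_eq_true hlt]
        exact List.map_congr_left (fun r _ => (pvRow_b2 r).symm)
    case neg =>
      rw [if_neg c2, decide_eq_false c2, Bool.false_and, Bool.false_and]
      exact ((List.map_congr_left (fun r _ => pvRow_id r)).trans (List.map_id square)).symm

-- ===== VERDICT (by name: the statement is the Claim_ definition above) =====
theorem giftExchange_spec : Claim_equal_giftExchange := by
  intro square _ _
  unfold Spec_giftExchange
  exact pvMain square
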